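-- pv_equiv track=rewrite | github.com/pecalleja/PythonLocalDevelopment | src/codesignal/bit_manipulation/lone_bit.py | solution
-- ===== SOURCE A (Python) =====
-- def solution(n: int) -> int:
--     if n == 0 or n & (n - 1) != 0:
--         return -1
--     position = 1
--     while n > 0:
--         if n & 1 == 1 and n & (n - 1) == 0:
--             return position
--         n >>= 1
--         position += 1
--     return -1
-- ===== SOURCE B (Python) =====
-- def solution(n: int) -> int:
--     if n == 0 or n & (n - 1) != 0:
--         return -1
--     return n.bit_length()
-- ===== Notes on version B (the rewrite author's own statement) =====
-- stated objective: idiomatic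
-- what changed: Replaces the bit-scanning while-loop with the closed form n.bit_length(), which equals the one-based position of the lone set bit for any positive power of two; the guard is unchanged.
import Mathlib
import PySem

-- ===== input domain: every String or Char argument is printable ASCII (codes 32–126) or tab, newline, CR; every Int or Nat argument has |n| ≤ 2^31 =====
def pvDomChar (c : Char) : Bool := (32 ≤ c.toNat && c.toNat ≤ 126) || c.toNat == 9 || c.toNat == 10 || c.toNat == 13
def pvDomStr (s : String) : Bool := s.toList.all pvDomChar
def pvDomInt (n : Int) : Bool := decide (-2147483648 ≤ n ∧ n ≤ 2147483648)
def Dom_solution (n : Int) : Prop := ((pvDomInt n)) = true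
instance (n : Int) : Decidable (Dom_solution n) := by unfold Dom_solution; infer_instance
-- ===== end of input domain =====

-- B replaces A's bit-scanning while-loop by the closed form n.bit_length(); guard unchanged (objective: idiomatic).

-- ===== PORT A =====
-- termination helper for the while-loop port (cited by decreasing_by)
theorem pvShiftLt (n : Int) (h : 0 < n) : (n >>> (1:Nat)).toNat < n.toNat := by
  rw [Int.shiftRight_eq_div_pow]; omega

-- the `while n > 0` loop of A, with its running `position` counter
def solutionLoop (n : Int) (position : Int) : Int :=
  if h : 0 < n then
    if PySem.Int.band n 1 = 1 ∧ PySem.Int.band n (n - 1) = 0 then position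
    else solutionLoop (n >>> (1:Nat)) (position + 1)
  else -1
termination_by n.toNat
decreasing_by exact pvShiftLt n h

def solution (n : Int) : Int :=
  if n = 0 ∨ PySem.Int.band n (n - 1) ≠ 0 then -1
  else solutionLoop n 1

-- ===== PORT B =====
def solution_alt (n : Int) : Int :=
  if n = 0 ∨ PySem.Int.band n (n - 1) ≠ 0 then -1
  else ↑(PySem.Int.bitLength n)    -- n.bit_length()

-- ===== PRECONDITION & SPEC =====
def Spec_solution (n : Int) (out : Int) : Prop := out = solution_alt n
instance (n : Int) (out : Int) : Decidable (Spec_solution n out) := by unfold Spec_solution; infer_instance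

-- ===== CLAIM (what is proved, stated in full; the proofs are below) =====
def Claim_equal_solution : Prop := ∀ (n : Int), Dom_solution n → Spec_solution n (solution n)

-- ===== LEMMAS AND PROOFS =====

-- bitwise AND on Nat, one bit at a time
theorem pvBitAndBit (a b : Nat) (x y : Bool) :
    (2*a + x.toNat) &&& (2*b + y.toNat) = 2*(a &&& b) + (x && y).toNat := by
  apply Nat.eq_of_testBit_eq
  intro i
  cases i with
  | zero => cases x <;> cases y <;> simp [Nat.testBit_zero]
  | succ j =>
    have hx : 2*a + x.toNat = Nat.bit x a := by simp [Nat.bit_val]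
    have hy : 2*b + y.toNat = Nat.bit y b := by simp [Nat.bit_val]
    have hz : 2*(a &&& b) + (x && y).toNat = Nat.bit (x && y) (a &&& b) := by simp [Nat.bit_val]
    rw [hx, hy, hz, Nat.testBit_and, Nat.testBit_bit_succ, Nat.testBit_bit_succ,
        Nat.testBit_bit_succ, Nat.testBit_and]

-- an odd power of two is 1
theorem pvOddPow (m : Nat) (hodd : m % 2 = 1) (h : m &&& (m - 1) = 0) : m = 1 := by
  obtain ⟨a, rfl⟩ : ∃ a, m = 2*a + 1 := ⟨m / 2, by omega⟩
  have hb := pvBitAndBit a a true false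
  simp [Nat.and_self] at hb
  have h' : (2*a + 1) &&& (2*a) = 0 := by simpa using h
  rw [hb] at h'
  omega

-- halving preserves the power-of-two test
theorem pvEvenStep (a : Nat) (ha : 0 < a) (h : (2*a) &&& (2*a - 1) = 0) : a &&& (a - 1) = 0 := by
  have h1 : 2*a - 1 = 2*(a-1) + (true : Bool).toNat := by simp; omega
  have h2 : 2*a = 2*a + (false : Bool).toNat := by simp
  rw [h1] at h
  conv at h => lhs; rw [h2]
  rw [pvBitAndBit a (a-1) false true] at h
  simp at h
  exact h

-- negative n: n & (n-1) is negative, hence nonzero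
theorem pvNegBand (n : Int) (h : n < 0) : PySem.Int.band n (n - 1) ≠ 0 := by
  obtain ⟨m, rfl⟩ : ∃ m, n = Int.negSucc m := by
    cases n with
    | ofNat k => exact absurd h (by rw [Int.ofNat_eq_natCast]; omega)
    | negSucc k => exact ⟨k, rfl⟩
  have h1 : Int.negSucc m - 1 = Int.negSucc (m + 1) := by
    simp [Int.negSucc_eq]; ring
  rw [h1]
  simp [PySem.Int.band, Int.negSucc_eq]
  intro hc
  omega

theorem pvShiftHalf (m : Nat) : ((↑(2*m) : Int) >>> (1:Nat)) = ↑m := by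
  rw [Int.shiftRight_eq_div_pow]; push_cast; omega

-- the loop on a positive power of two m returns position - 1 + bit_length(m)
theorem pvLoopEq (m : Nat) (hm : 0 < m) (hp : m &&& (m - 1) = 0) (p : Int) :
    solutionLoop (↑m) p = p - 1 + ↑(PySem.Int.bitLength (↑m : Int)) := by
  induction m using Nat.strong_induction_on generalizing p with
  | _ m ih =>
    rw [solutionLoop]
    have hpos : (0:Int) < ↑m := by exact_mod_cast hm
    rw [dif_pos hpos]
    have hsub : (↑m : Int) - 1 = ↑(m - 1) := by omega
    have hband : PySem.Int.band ↑m (↑m - 1) = ↑(m &&& (m-1)) := by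
      rw [hsub]; exact PySem.Int.band_natCast m (m-1)
    have hband1 : PySem.Int.band ↑m 1 = ↑(m &&& 1) := by
      have := PySem.Int.band_natCast m 1
      simpa using this
    rcases Nat.even_or_odd m with he | ho
    · -- even: first conjunct fails, recurse on m/2
      have hmod : m % 2 = 0 := Nat.even_iff.mp he
      obtain ⟨a, rfl⟩ : ∃ a, m = 2*a := ⟨m/2, by omega⟩
      have ha : 0 < a := by omega
      have hcond : ¬ (PySem.Int.band (↑(2*a)) 1 = 1 ∧ PySem.Int.band (↑(2*a)) (↑(2*a) - 1) = 0) := by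
        intro ⟨c1, _⟩
        rw [hband1] at c1
        have hm2 : (2*a) &&& 1 = (2*a) % 2 := Nat.and_one_is_mod _
        rw [hm2] at c1
        omega
      rw [if_neg hcond, pvShiftHalf a]
      have hrec := ih a (by omega) ha (pvEvenStep a ha hp) (p + 1)
      rw [hrec]
      have hbl : PySem.Int.bitLength (↑(2*a) : Int) = PySem.Int.bitLength (↑a : Int) + 1 := by
        have := PySem.Int.bitLength_natCast (m := 2*a) (by omega)
        have h2 : 2*a/2 = a := by omega
        rw [h2] at this
        exact this
      rw [hbl]; push_cast; ring
    · -- odd: m = 1, the loop returns p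
      have hmod : m % 2 = 1 := Nat.odd_iff.mp ho
      have hm1 : m = 1 := pvOddPow m hmod hp
      subst hm1
      have hcond : (PySem.Int.band (↑(1:Nat)) 1 = 1 ∧ PySem.Int.band (↑(1:Nat)) (↑(1:Nat) - 1) = 0) := by
        constructor <;> simp [PySem.Int.band]
      rw [if_pos hcond]
      have : PySem.Int.bitLength ((1:Nat) : Int) = 1 := by decide
      rw [this]; ring

-- ===== VERDICT (by name: the statement is the Claim_ definition above) =====
theorem solution_spec : Claim_equal_solution := by
  intro n _dom
  unfold Spec_solution solution solution_alt
  by_cases hg : n = 0 ∨ PySem.Int.band n (n - 1) ≠ 0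
  · rw [if_pos hg, if_pos hg]
  · rw [if_neg hg, if_neg hg]
    push Not at hg
    obtain ⟨hne, hband⟩ := hg
    have hpos : 0 < n := by
      rcases lt_trichotomy n 0 with h | h | h
      · exact absurd hband (pvNegBand n h)
      · exact absurd h hne
      · exact h
    obtain ⟨m, rfl⟩ : ∃ m : Nat, n = ↑m := ⟨n.toNat, by omega⟩
    have hm : 0 < m := by exact_mod_cast hpos
    have hb : m &&& (m - 1) = 0 := by
      have hsub : (↑m : Int) - 1 = ↑(m - 1) := by omega
      rw [hsub, PySem.Int.band_natCast] at hband
      exact_mod_cast hband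
    rw [pvLoopEq m hm hb 1]
    ring
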